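-- pv_equiv track=rewrite | github.com/ARQMath/ARQMathCode | Prepare_Dataset/generate_post_xml.py | set_formulas
-- ===== SOURCE A (Python) =====
-- def check_existence(dic_find_id):
--     lst_index = list(set(dic_find_id.values()))
--     if len(lst_index) > 1:
--         return True
--     elif lst_index[0] == -1:
--         return False
--     return True
--
-- def get_sorted_dic_formulas(lst_formula, dic_formula_id_latex):
--     temp_dic = {}
--     for formula_id in lst_formula:
--         temp_dic[formula_id] = dic_formula_id_latex[formula_id]
--     soreted_formula_ids = sorted(temp_dic, key=lambda k: len(temp_dic[k]), reverse=True)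
--     return soreted_formula_ids
--
-- def set_formulas(text, lst_formula, dic_latex, replaceing_dic):
--     """
--     Input:
--         text: the input text that its formulas need to be converted to Arqmath notation, where each formula has an
--         unique id and is in math-container tag
--         post_id: the post_id of the current text, question id, answer id or the comment id
--         map_formulas: the dictionary in form of (post id, dictionary of (formula id: latex))
--         map_id_type: the dictionary which shows where is each of the formulas located (formula_id: type)
--         text_type: shows the current text (first input) is a title, question, answer or comment
--     """
--     lst_not_found_formulas = []
--     lst_found = []
--     text = text.replace("\r", "\n", text.count("\r"))
--     "Iteration on the formulas in the current text"
--
--     soreted_formula_ids = get_sorted_dic_formulas(lst_formula, dic_latex)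
--
--     for formula_id in soreted_formula_ids:
--         """
--             the formula should be located in the same type of text, why we have this?
--             the title and question have the same ids, so if the formula is in both title and question,
--             we do not know which one to replace (replace the original formula with the math-container tag one)
--         """
--         "the original formula"
--         formula = dic_latex[formula_id]
--
--         "the string that will be replaced by the original formula, it has math-container tag and formula id"
--         to_write_string = "<span class=\"math-container\" id=\"" + str(formula_id) + "\">" + formula + "</span>"
--
--         map_index = match_to_pattern(formula, text)
--
--         exists = check_existence(map_index)
--
--         if exists:
--             sorted_x = sorted(map_index.items(), key=lambda kv: kv[1])
--             for item in sorted_x: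
--                 if item[1] != -1:
--                     detected_formula = item[0]
--                     fake_string = "FXXF_" + str(formula_id)
--                     replaceing_dic[fake_string] = to_write_string
--                     text = text.replace(detected_formula, fake_string, 1)
--                     lst_found.append(formula_id)
--                     break
--         else:
--             lst_not_found_formulas.append(formula_id)
--     return text, lst_found, lst_not_found_formulas
--
-- def match_to_pattern(formula, text):
--     """Each formula can be located in the text in one this 6 form, (text6) should not happen but
--         just added for the case. Note that in the formula index file from which we created the map
--         we only have the latex of formula not how the formula was located in the text.
--
--         For example a formula can be like "<span class="math-container> $a+b$ </span>" in the original MSE dataset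
--         but we only keep a+b.
--
--         So we check which of these 6 format was the one that the original formula was written in, and also note in the
--         map, formulas are sorted based on their order in the original, so we use these 6 format, find their first
--         occurrence and replace them with our desired text.
--         """
--     # text = text.replace("\n", "")
--     map_index = {}
--     text1 = "<span class=\"math-container\">$$ " + formula + " $$</span>"
--     map_index[text1] = text.find(text1)
--     text7 = "<span class=\"math-container\">$$" + formula + "$$</span>"
--     map_index[text7] = text.find(text7)
--     text2 = "<span class=\"math-container\">$" + formula + "$</span>"
--     map_index[text2] = text.find(text2)
--     text8 = "<span class=\"math-container\">$$" + formula + "$$</span>"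
--     map_index[text8] = text.find(text8)
--     text3 = "<span class=\"math-container\">" + formula + "</span>"
--     map_index[text3] = text.find(text3)
--     text4 = "$$" + formula + "$$"
--     map_index[text4] = text.find(text4)
--     text5 = "$" + formula + "$"
--     map_index[text5] = text.find(text5)
--     text6 = " " + formula + " "
--     map_index[text6] = text.find(text6)
--     return map_index
-- ===== SOURCE B (Python) =====
-- def set_formulas(text, lst_formula, dic_latex, replaceing_dic):
--     """Position-major rewrite: for each formula we make ONE left-to-right scan of
--     the text, asking at each index which (if any) wrapper pattern starts there,
--     and splice the placeholder in at that index directly -- no per-pattern find,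
--     no position dict, no set test, no sort, no replace().  replaceing_dic is
--     filled in place exactly as A does."""
--     text = text.replace("\r", "\n")
--     order = sorted(dict.fromkeys(lst_formula),
--                    key=lambda k: len(dic_latex[k]), reverse=True)
--     lst_found = []
--     lst_not_found_formulas = []
--     for fid in order:
--         f = dic_latex[fid]
--         pats = ['<span class="math-container">$$ ' + f + ' $$</span>',
--                 '<span class="math-container">$$' + f + '$$</span>',
--                 '<span class="math-container">$' + f + '$</span>',
--                 '<span class="math-container">' + f + '</span>',
--                 '$$' + f + '$$',
--                 '$' + f + '$',
--                 ' ' + f + ' ']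
--         hit = _scan(text, pats)
--         if hit is None:
--             lst_not_found_formulas.append(fid)
--         else:
--             i, p = hit
--             fake = "FXXF_" + str(fid)
--             replaceing_dic[fake] = ('<span class="math-container" id="'
--                                     + str(fid) + '">' + f + '</span>')
--             text = text[:i] + fake + text[i + len(p):]
--             lst_found.append(fid)
--     return text, lst_found, lst_not_found_formulas
--
-- def _scan(text, pats):
--     """(index, pattern) of the leftmost place where any pattern starts (first
--     pattern in pats winning a same-index tie), or None if none occurs."""
--     for i in range(len(text)):
--         for p in pats:
--             if text.startswith(p, i):
--                 return i, p
--     return None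
-- ===== Notes on version B (the rewrite author's own statement) =====
-- stated objective: alternative
-- what changed: Pattern-major search (8 find calls per formula collected in a dict, filtered through a set, sorted by position, then replace(,,1)) is replaced by a position-major algorithm: one left-to-right scan of the text per formula that asks at each index which wrapper pattern starts there and splices the placeholder in at that index by slicing, with no find, no dict, no sort and no replace.
import Mathlib
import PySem

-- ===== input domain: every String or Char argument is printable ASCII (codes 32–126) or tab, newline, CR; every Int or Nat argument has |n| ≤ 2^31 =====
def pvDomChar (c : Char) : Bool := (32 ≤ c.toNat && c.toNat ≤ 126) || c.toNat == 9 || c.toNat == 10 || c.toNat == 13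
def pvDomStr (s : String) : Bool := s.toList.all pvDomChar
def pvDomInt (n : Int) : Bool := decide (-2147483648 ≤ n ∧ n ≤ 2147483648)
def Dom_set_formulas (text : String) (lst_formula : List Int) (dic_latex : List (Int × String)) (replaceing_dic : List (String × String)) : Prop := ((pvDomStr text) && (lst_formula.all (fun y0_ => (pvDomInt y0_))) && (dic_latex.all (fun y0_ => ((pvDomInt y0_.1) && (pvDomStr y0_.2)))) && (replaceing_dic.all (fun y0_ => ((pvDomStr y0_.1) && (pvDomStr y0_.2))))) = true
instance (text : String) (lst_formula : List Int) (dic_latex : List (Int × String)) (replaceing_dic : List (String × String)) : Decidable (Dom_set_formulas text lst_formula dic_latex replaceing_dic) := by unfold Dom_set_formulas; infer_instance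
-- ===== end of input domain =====

-- B replaces A's pattern-major search (8 finds in a dict + set test + sort + replace) by a
-- position-major one: one left-to-right scan per formula checking which pattern starts at each
-- index, then a direct splice at that index (objective: alternative decomposition, same cost).
-- Both Pythons also write entries into replaceing_dic in place (identically); that mutation is
-- invisible in the return value and is not modelled here.

-- ===== PORT A =====
-- hand port of Python's s.replace(old, new, 1) (PySem.Str.replace has no count form):
-- splice new over the FIRST occurrence of old; exact, incl. old = "" (new is prepended).
def pyReplace1 (s old new : String) : String :=
  let pos := PySem.Str.find s old
  if pos = -1 then s
  else String.ofList (s.toList.take pos.toNat ++ new.toList ++ s.toList.drop (pos.toNat + old.toList.length))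

def match_to_pattern (formula : String) (text : String) : PySem.Dict String Int :=
  let map_index : PySem.Dict String Int := PySem.Dict.empty
  let text1 := "<span class=\"math-container\">$$ " ++ formula ++ " $$</span>"
  let map_index := map_index.insert text1 (PySem.Str.find text text1)
  let text7 := "<span class=\"math-container\">$$" ++ formula ++ "$$</span>"
  let map_index := map_index.insert text7 (PySem.Str.find text text7)
  let text2 := "<span class=\"math-container\">$" ++ formula ++ "$</span>"
  let map_index := map_index.insert text2 (PySem.Str.find text text2)
  let text8 := "<span class=\"math-container\">$$" ++ formula ++ "$$</span>"
  let map_index := map_index.insert text8 (PySem.Str.find text text8)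
  let text3 := "<span class=\"math-container\">" ++ formula ++ "</span>"
  let map_index := map_index.insert text3 (PySem.Str.find text text3)
  let text4 := "$$" ++ formula ++ "$$"
  let map_index := map_index.insert text4 (PySem.Str.find text text4)
  let text5 := "$" ++ formula ++ "$"
  let map_index := map_index.insert text5 (PySem.Str.find text text5)
  let text6 := " " ++ formula ++ " "
  let map_index := map_index.insert text6 (PySem.Str.find text text6)
  map_index

def check_existence (dic_find_id : PySem.Dict String Int) : Bool :=
  let lst_index : List Int := PySem.Set.ofList dic_find_id.values
  if 1 < lst_index.length then true
  -- lst_index[0]: the dict is never empty where A calls this, so the IndexError branch is dead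
  else if PySem.List.pyGet? lst_index 0 = some (-1) then false
  else true

-- temp_dic[formula_id] = dic_formula_id_latex[formula_id]: the KeyError (id absent) is excluded
-- by Pre_set_formulas; the total port reads the missing value as "".
def get_sorted_dic_formulas (lst_formula : List Int) (dic_formula_id_latex : PySem.Dict Int String) : List Int :=
  let temp_dic : PySem.Dict Int String :=
    lst_formula.foldl (fun d fid => d.insert fid ((dic_formula_id_latex.get? fid).getD "")) PySem.Dict.empty
  PySem.List.sorted temp_dic.keys (fun k => (PySem.Str.len ((temp_dic.get? k).getD "") : Int)) true

-- the body of A's for-loop over soreted_formula_ids (one formula replacement)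
def set_formulas_loop (dic : PySem.Dict Int String) (st : String × List Int × List Int) (formula_id : Int) : String × List Int × List Int :=
  let formula := (dic.get? formula_id).getD ""
  let map_index := match_to_pattern formula st.1
  if check_existence map_index then
    let sorted_x := PySem.List.sorted map_index.items (fun kv => kv.2) false
    -- "for item in sorted_x: if item[1] != -1: …; break" = act on the first such item
    match sorted_x.find? (fun kv => kv.2 ≠ -1) with
    | some item =>
        let fake_string := "FXXF_" ++ PySem.Int.toStr formula_id
        (pyReplace1 st.1 item.1 fake_string, st.2.1 ++ [formula_id], st.2.2)
    | none => st  -- unreachable: check_existence guarantees some value ≠ -1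
  else (st.1, st.2.1, st.2.2 ++ [formula_id])

def set_formulas (text : String) (lst_formula : List Int) (dic_latex : List (Int × String)) (replaceing_dic : List (String × String)) : String × List Int × List Int :=
  -- text.replace("\r", "\n", text.count("\r")): the count is the total number of occurrences,
  -- so this is exactly replace-all
  (get_sorted_dic_formulas lst_formula (PySem.Dict.ofList dic_latex)).foldl
    (set_formulas_loop (PySem.Dict.ofList dic_latex))
    (PySem.Str.replace text "\r" "\n", ([], []))

-- ===== PORT B =====
-- _scan: "for i in range(len(text)): for p in pats: if text.startswith(p, i): return i, p"
-- (the inner for-loop with return is List.find?; the outer loop is structural recursion on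
-- the suffix, carrying the index i)
def scanHit (pats : List (List Char)) : List Char → Nat → Option (Nat × List Char)
  | [], _ => none
  | c :: rest, i =>
      match pats.find? (fun p => p.isPrefixOf (c :: rest)) with
      | some p => some (i, p)
      | none => scanHit pats rest (i + 1)

-- the body of B's for-loop over order (one formula: scan, then splice by slicing)
def set_formulas_alt_loop (dic : PySem.Dict Int String) (st : String × List Int × List Int) (fid : Int) : String × List Int × List Int :=
  let f := (dic.get? fid).getD ""
  let pats := ["<span class=\"math-container\">$$ " ++ f ++ " $$</span>",
               "<span class=\"math-container\">$$" ++ f ++ "$$</span>",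
               "<span class=\"math-container\">$" ++ f ++ "$</span>",
               "<span class=\"math-container\">" ++ f ++ "</span>",
               "$$" ++ f ++ "$$",
               "$" ++ f ++ "$",
               " " ++ f ++ " "]
  match scanHit (pats.map String.toList) st.1.toList 0 with
  | none => (st.1, st.2.1, st.2.2 ++ [fid])
  | some (i, p) =>
      let fake := "FXXF_" ++ PySem.Int.toStr fid
      -- text = text[:i] + fake + text[i + len(p):]
      (String.ofList (st.1.toList.take i ++ fake.toList ++ st.1.toList.drop (i + p.length)),
       st.2.1 ++ [fid], st.2.2)

def set_formulas_alt (text : String) (lst_formula : List Int) (dic_latex : List (Int × String)) (replaceing_dic : List (String × String)) : String × List Int × List Int :=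
  -- sorted(dict.fromkeys(lst_formula), key=lambda k: len(dic_latex[k]), reverse=True);
  -- the KeyError (id absent from dic_latex) is excluded by Pre_
  (PySem.List.sorted (PySem.List.dedup lst_formula)
      (fun k => (PySem.Str.len (((PySem.Dict.ofList dic_latex).get? k).getD "") : Int)) true).foldl
    (set_formulas_alt_loop (PySem.Dict.ofList dic_latex))
    (PySem.Str.replace text "\r" "\n", ([], []))

-- ===== PRECONDITION & SPEC =====
-- Pre_ excludes exactly the inputs where the Python raises: a formula id in lst_formula that is
-- not a key of dic_latex is a KeyError (in A's get_sorted_dic_formulas, in B's sort key).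
def Pre_set_formulas (text : String) (lst_formula : List Int) (dic_latex : List (Int × String)) (replaceing_dic : List (String × String)) : Prop :=
  ∀ fid ∈ lst_formula, ∃ p ∈ dic_latex, p.1 = fid
instance (text : String) (lst_formula : List Int) (dic_latex : List (Int × String)) (replaceing_dic : List (String × String)) : Decidable (Pre_set_formulas text lst_formula dic_latex replaceing_dic) := by unfold Pre_set_formulas; infer_instance

def pvWitness_set_formulas : String × List Int × (List (Int × String)) × (List (String × String)) :=
  ("see $a+b$ here", [7], [(7, "a+b")], [])

def Spec_set_formulas (text : String) (lst_formula : List Int) (dic_latex : List (Int × String)) (replaceing_dic : List (String × String)) (out : String × List Int × List Int) : Prop := out = set_formulas_alt text lst_formula dic_latex replaceing_dic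
instance (text : String) (lst_formula : List Int) (dic_latex : List (Int × String)) (replaceing_dic : List (String × String)) (out : String × List Int × List Int) : Decidable (Spec_set_formulas text lst_formula dic_latex replaceing_dic out) := by unfold Spec_set_formulas; infer_instance

-- ===== CLAIM (what is proved, stated in full; the proofs are below) =====
def Claim_equal_set_formulas : Prop := ∀ (text : String) (lst_formula : List Int) (dic_latex : List (Int × String)) (replaceing_dic : List (String × String)), Dom_set_formulas text lst_formula dic_latex replaceing_dic → Pre_set_formulas text lst_formula dic_latex replaceing_dic → Spec_set_formulas text lst_formula dic_latex replaceing_dic (set_formulas text lst_formula dic_latex replaceing_dic)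


-- ===== LEMMAS AND PROOFS =====

def pvSelStep (b : Option (String × Int)) (kv : String × Int) : Option (String × Int) :=
  match b with
  | none => if kv.2 ≠ -1 then some kv else none
  | some c => if kv.2 ≠ -1 ∧ kv.2 < c.2 then some kv else some c

def pvSelMin (l : List (String × Int)) : Option (String × Int) := l.foldl pvSelStep none

theorem pvSelFold_some (l : List (String × Int)) :
    ∀ (b : String × Int), b.2 ≠ -1 →
      ∃ b', l.foldl pvSelStep (some b) = some b' ∧ b'.2 ≤ b.2 ∧ b'.2 ≠ -1 := by
  induction l with
  | nil => intro b hb; exact ⟨b, rfl, le_refl _, hb⟩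
  | cons kv l ih =>
      intro b hb
      simp only [List.foldl_cons]
      by_cases h : kv.2 ≠ -1 ∧ kv.2 < b.2
      · obtain ⟨b', h1, h2, h3⟩ := ih kv h.1
        exact ⟨b', by simpa [pvSelStep, h] using h1, le_trans h2 (le_of_lt h.2), h3⟩
      · obtain ⟨b', h1, h2, h3⟩ := ih b hb
        exact ⟨b', by simpa [pvSelStep, h] using h1, h2, h3⟩

theorem pvSelFold_mem (l : List (String × Int)) :
    ∀ (kv : String × Int), kv ∈ l → kv.2 ≠ -1 →
      ∀ acc : Option (String × Int), (∀ b, acc = some b → b.2 ≠ -1) →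
      ∃ b', l.foldl pvSelStep acc = some b' ∧ b'.2 ≤ kv.2 ∧ b'.2 ≠ -1 := by
  induction l with
  | nil => intro kv h; simp at h
  | cons x l ih =>
      intro kv hmem hkv acc hacc
      simp only [List.foldl_cons]
      rcases List.mem_cons.1 hmem with rfl | hmem'
      · match hc : acc with
        | none =>
            obtain ⟨b', h1, h2, h3⟩ := pvSelFold_some l kv hkv
            exact ⟨b', by simpa [pvSelStep, hkv] using h1, h2, h3⟩
        | some c =>
            have hc2 : c.2 ≠ -1 := hacc c rfl
            by_cases h : kv.2 ≠ -1 ∧ kv.2 < c.2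
            · obtain ⟨b', h1, h2, h3⟩ := pvSelFold_some l kv hkv
              exact ⟨b', by simpa [pvSelStep, h] using h1, h2, h3⟩
            · have hle : c.2 ≤ kv.2 := by
                rcases not_and_or.1 h with h' | h'
                · exact absurd hkv h'
                · omega
              obtain ⟨b', h1, h2, h3⟩ := pvSelFold_some l c hc2
              exact ⟨b', by simpa [pvSelStep, h] using h1, le_trans h2 hle, h3⟩
      · exact ih kv hmem' hkv _ (by
          intro b hb
          match hc : acc with
          | none => simp only [pvSelStep] at hb; split at hb <;> simp_all
          | some c =>
              have hc2 := hacc c rfl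
              simp only [pvSelStep] at hb; split at hb <;> simp_all)

theorem pvSelFold_none_iff (l : List (String × Int)) :
    l.foldl pvSelStep none = none ↔ ∀ kv ∈ l, kv.2 = -1 := by
  constructor
  · intro h kv hmem
    by_contra hne
    obtain ⟨b', h1, _, _⟩ := pvSelFold_mem l kv hmem hne none (by simp)
    rw [h1] at h; cases h
  · intro h
    induction l with
    | nil => rfl
    | cons kv l ih =>
        have := h kv (List.mem_cons_self)
        simp only [List.foldl_cons, pvSelStep, this]
        exact ih (fun x hx => h x (List.mem_cons_of_mem _ hx))

-- full characterization of the fold: the result is the FIRST element achieving the minimum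
theorem pvFold_some_spec (l : List (String × Int)) :
    ∀ (acc : Option (String × Int)) (b : String × Int),
      l.foldl pvSelStep acc = some b →
      ((acc = some b ∨ (∃ l1 l2, l = l1 ++ b :: l2 ∧ b.2 ≠ -1 ∧
          (∀ kv ∈ l1, kv.2 = -1 ∨ b.2 < kv.2) ∧ (∀ c, acc = some c → b.2 < c.2)))
        ∧ ∀ kv ∈ l, kv.2 = -1 ∨ b.2 ≤ kv.2) := by
  induction l with
  | nil =>
      intro acc b h
      simp only [List.foldl_nil] at h
      exact ⟨Or.inl h, by simp⟩
  | cons x l ih =>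
      intro acc b h
      simp only [List.foldl_cons] at h
      obtain ⟨hd, hmin⟩ := ih (pvSelStep acc x) b h
      have hstep_le : ∀ c', pvSelStep acc x = some c' → c'.2 ≤ x.2 ∨ x.2 = -1 := by
        intro c' hc'
        cases acc with
        | none =>
            simp only [pvSelStep] at hc'
            split at hc' <;> simp_all
        | some c =>
            simp only [pvSelStep] at hc'
            by_cases hx : x.2 ≠ -1 ∧ x.2 < c.2
            · rw [if_pos hx] at hc'
              injection hc' with hc'; subst hc'; left; exact le_refl _
            · rw [if_neg hx] at hc'
              injection hc' with hc'; subst hc'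
              rcases not_and_or.1 hx with h' | h'
              · right; simpa using h'
              · left; omega
      have hstep_ne : pvSelStep acc x = none → x.2 = -1 := by
        intro hn
        cases acc with
        | none =>
            simp only [pvSelStep] at hn
            by_contra hx; simp [hx] at hn
        | some c => simp only [pvSelStep] at hn; split at hn <;> simp_all
      have hxmin : x.2 = -1 ∨ b.2 ≤ x.2 := by
        rcases hd with hb | ⟨l1, l2, heq, hbne, hl1, haccc⟩
        · rcases hstep_le b hb with h' | h'
          · right; exact h'
          · left; exact h'
        · match hstep : pvSelStep acc x with
          | none => exact Or.inl (hstep_ne hstep)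
          | some c' =>
              rcases hstep_le c' hstep with h' | h'
              · right; exact le_of_lt (lt_of_lt_of_le (haccc c' hstep) h')
              · left; exact h'
      refine ⟨?_, ?_⟩
      · rcases hd with hb | ⟨l1, l2, heq, hbne, hl1, haccc⟩
        · -- b came out of the step
          cases acc with
          | none =>
              simp only [pvSelStep] at hb
              by_cases hx : x.2 ≠ -1
              · rw [if_pos hx] at hb
                injection hb with hb; subst hb
                exact Or.inr ⟨[], l, rfl, hx, by simp, by simp⟩
              · rw [if_neg hx] at hb; cases hb
          | some c =>
              simp only [pvSelStep] at hb
              by_cases hx : x.2 ≠ -1 ∧ x.2 < c.2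
              · rw [if_pos hx] at hb
                injection hb with hb; subst hb
                exact Or.inr ⟨[], l, rfl, hx.1, by simp, by rintro c0 ⟨rfl⟩; exact hx.2⟩
              · rw [if_neg hx] at hb
                injection hb with hb; subst hb
                exact Or.inl rfl
        · -- b came from l
          refine Or.inr ⟨x :: l1, l2, by rw [heq]; rfl, hbne, ?_, ?_⟩
          · intro kv hkv
            rcases List.mem_cons.1 hkv with rfl | hkv'
            · by_cases hx : kv.2 = -1
              · exact Or.inl hx
              · right
                match hstep : pvSelStep acc kv with
                | none => exact absurd (hstep_ne hstep) hx
                | some c' =>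
                    rcases hstep_le c' hstep with h' | h'
                    · exact lt_of_lt_of_le (haccc c' hstep) h'
                    · exact absurd h' hx
            · exact hl1 kv hkv'
          · intro c hacc2
            subst hacc2
            by_cases hx : x.2 ≠ -1 ∧ x.2 < c.2
            · have hb := haccc x (by simp only [pvSelStep]; rw [if_pos hx])
              exact lt_trans hb hx.2
            · exact haccc c (by simp only [pvSelStep]; rw [if_neg hx])
      · intro kv hkv
        rcases List.mem_cons.1 hkv with rfl | hkv'
        · rcases hxmin with h' | h'
          · exact Or.inl h'
          · exact Or.inr h'
        · exact hmin kv hkv'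

theorem pvSelMin_some_spec (l : List (String × Int)) (b : String × Int) (h : pvSelMin l = some b) :
    ∃ l1 l2, l = l1 ++ b :: l2 ∧ b.2 ≠ -1 ∧
      (∀ kv ∈ l1, kv.2 = -1 ∨ b.2 < kv.2) ∧ (∀ kv ∈ l, kv.2 = -1 ∨ b.2 ≤ kv.2) := by
  obtain ⟨hd, hmin⟩ := pvFold_some_spec l none b h
  rcases hd with hb | ⟨l1, l2, heq, hbne, hl1, _⟩
  · cases hb
  · exact ⟨l1, l2, heq, hbne, hl1, hmin⟩

theorem pvInsertBy_eq (before : (String × Int) → (String × Int) → Bool) (x : String × Int) (ys : List (String × Int)) :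
    PySem.List.insertBy before x ys
      = ys.takeWhile (fun y => !(before x y)) ++ x :: ys.dropWhile (fun y => !(before x y)) := by
  induction ys with
  | nil => rfl
  | cons y ys ih =>
      by_cases h : before x y = true
      · simp [PySem.List.insertBy, h]
      · simp only [Bool.not_eq_true] at h
        simp [PySem.List.insertBy, h, ih]

theorem pvSEL (l : List (String × Int)) (h : ∀ kv ∈ l, -1 ≤ kv.2) :
    (PySem.List.sorted l (fun kv => kv.2) false).find? (fun kv => kv.2 ≠ -1) = pvSelMin l := by
  induction l using List.reverseRecOn with
  | nil => rfl
  | append_singleton l x ih =>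
      have hvals : ∀ kv ∈ l, -1 ≤ kv.2 := fun kv hkv => h kv (List.mem_append_left _ hkv)
      have hx : -1 ≤ x.2 := h x (List.mem_append_right _ (List.mem_singleton_self x))
      have ihl := ih hvals
      set key : (String × Int) → Int := fun kv => kv.2 with hkey
      set s := PySem.List.sorted l key false with hs
      have hstep : PySem.List.sorted (l ++ [x]) key false
          = PySem.List.insertBy (fun a b => decide (key a < key b)) x s := by
        rw [PySem.List.sorted_eq_foldl_insertBy, List.foldl_append, ← PySem.List.sorted_eq_foldl_insertBy]
        rfl
      have hsel : pvSelMin (l ++ [x]) = pvSelStep (pvSelMin l) x := by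
        simp [pvSelMin, List.foldl_append]
      set P : (String × Int) → Bool := fun kv => decide (kv.2 ≠ -1) with hP
      set q : (String × Int) → Bool := fun y => !(decide (key x < key y)) with hq
      have hsplit : s.takeWhile q ++ s.dropWhile q = s := List.takeWhile_append_dropWhile
      have hpair : s.Pairwise (fun a b => key a ≤ key b) := PySem.List.sorted_pairwise l key
      have hsfind : List.find? P s = (List.find? P (s.takeWhile q)).or (List.find? P (s.dropWhile q)) := by
        conv_lhs => rw [← hsplit]
        rw [List.find?_append]
      rw [hstep, pvInsertBy_eq, hsel, ← ihl, hsfind, List.find?_append]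
      simp only [← hq]
      by_cases hxneg : x.2 = -1
      · have htw : List.find? P (s.takeWhile q) = none := by
          rw [List.find?_eq_none]
          intro y hy
          have := List.mem_takeWhile_imp hy
          have hy2 : -1 ≤ y.2 := by
            have : y ∈ s := (List.takeWhile_sublist q).mem hy
            exact hvals y ((PySem.List.mem_sorted l key false y).1 this)
          simp only [hq, hkey, hxneg, Bool.not_eq_true', decide_eq_false_iff_not, not_lt] at this
          simp [hP]; omega
        have hxP : P x = false := by simp [hP, hxneg]
        simp only [htw, Option.none_or, List.find?_cons, hxP]
        cases hfind : List.find? P (s.dropWhile q) <;> simp [pvSelStep, hxneg]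
      · have hxP : P x = true := by simp [hP, hxneg]
        cases htw : List.find? P (s.takeWhile q) with
        | some m =>
            have hmle : key m ≤ key x := by
              have := List.mem_takeWhile_imp (List.mem_of_find?_eq_some htw)
              simp only [hq, Bool.not_eq_true', decide_eq_false_iff_not, not_lt] at this
              exact this
            have hmP : m.2 ≠ -1 := by have := List.find?_some htw; simpa [hP] using this
            simp only [Option.some_or]
            simp only [pvSelStep]
            have : ¬ (x.2 ≠ -1 ∧ x.2 < m.2) := by simp only [hkey] at hmle; omega
            simp [this]
        | none =>
            simp only [Option.none_or, List.find?_cons, hxP]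
            cases hdw : List.find? P (s.dropWhile q) with
            | none => simp [pvSelStep, hxneg]
            | some m =>
                have hne : s.dropWhile q ≠ [] := by
                  intro hnil; rw [hnil] at hdw; cases hdw
                have hhead := List.head_dropWhile_not q hne
                have hheadlt : key x < key ((s.dropWhile q).head hne) := by
                  simpa [hq] using hhead
                have hpair2 : (s.dropWhile q).Pairwise (fun a b => key a ≤ key b) :=
                  hpair.sublist (List.dropWhile_sublist q)
                have hmlt : key x < key m := by
                  have hmem := List.mem_of_find?_eq_some hdw
                  cases hdwl : s.dropWhile q with
                  | nil => rw [hdwl] at hdw; cases hdw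
                  | cons h0 t =>
                      have hh : q h0 = false := by
                        have h0h := List.head_dropWhile_not q hne
                        simp only [hdwl, List.head_cons] at h0h
                        exact h0h
                      have hlt0 : key x < key h0 := by simpa [hq] using hh
                      rw [hdwl] at hmem hpair2
                      rcases List.mem_cons.1 hmem with rfl | h1
                      · exact hlt0
                      · have := (List.pairwise_cons.1 hpair2).1 m h1
                        simp only [hkey] at *
                        omega
                simp only [pvSelStep]
                have : x.2 ≠ -1 ∧ x.2 < m.2 := ⟨hxneg, hmlt⟩
                simp [this]

theorem pvGet_foldl_insert {κ ν : Type} [BEq κ] [LawfulBEq κ] (F : κ → ν) (ps : List κ) (d : PySem.Dict κ ν) (k : κ) :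
    (ps.foldl (fun d p => d.insert p (F p)) d).get? k = if k ∈ ps then some (F k) else d.get? k := by
  induction ps generalizing d with
  | nil => simp
  | cons p ps ih =>
      simp only [List.foldl_cons, ih, List.mem_cons]
      by_cases hk : k ∈ ps
      · simp [hk]
      · by_cases hkp : k = p
        · subst hkp; simp [hk, PySem.Dict.get?_insert_self]
        · simp [hk, hkp, PySem.Dict.get?_insert_of_ne _ _ hkp]

theorem pvItems_foldl_insert (F : String → Int) (ps : List String) :
    (ps.foldl (fun d p => d.insert p (F p)) PySem.Dict.empty).items
      = (PySem.List.dedup ps).map (fun p => (p, F p)) := by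
  set D := ps.foldl (fun d p => d.insert p (F p)) PySem.Dict.empty with hD
  have hkeys : D.keys = PySem.Set.ofList ps := by
    rw [hD, PySem.Dict.keys_foldl_insert, PySem.Set.ofList_eq_foldl]
    rfl
  have hnd : D.keys.Nodup := by rw [hkeys]; exact PySem.Set.nodup_ofList ps
  rw [PySem.Dict.items_eq_map_keys D hnd 0, hkeys]
  simp only [PySem.List.dedup_eq_ofList]
  apply List.map_congr_left
  intro p hp
  have hps : p ∈ ps := (PySem.Set.mem_ofList ps p).1 hp
  simp [PySem.Dict.getD, hD, pvGet_foldl_insert, hps]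

theorem pvOfList_dup (xs ys : List String) (x : String) (hx : x ∈ xs) :
    PySem.Set.ofList (xs ++ x :: ys) = PySem.Set.ofList (xs ++ ys) := by
  rw [PySem.Set.ofList_eq_foldl, PySem.Set.ofList_eq_foldl, List.foldl_append, List.foldl_append,
    List.foldl_cons]
  have : PySem.Set.add (List.foldl PySem.Set.add [] xs) x = List.foldl PySem.Set.add [] xs := by
    have hmem : x ∈ List.foldl PySem.Set.add [] xs := by
      rw [← PySem.Set.ofList_eq_foldl]; exact (PySem.Set.mem_ofList xs x).2 hx
    simp [PySem.Set.add, PySem.Set.contains, hmem]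
  rw [this]

theorem pvSelMin_dedup (F : String → Int) (ps : List String) :
    pvSelMin ((PySem.List.dedup ps).map (fun p => (p, F p))) = pvSelMin (ps.map (fun p => (p, F p))) := by
  induction ps using List.reverseRecOn with
  | nil => rfl
  | append_singleton ps x ih =>
      simp only [PySem.List.dedup_eq_ofList] at *
      have hof : PySem.Set.ofList (ps ++ [x]) = PySem.Set.add (PySem.Set.ofList ps) x := by
        rw [PySem.Set.ofList_eq_foldl, PySem.Set.ofList_eq_foldl, List.foldl_append, List.foldl_cons, List.foldl_nil]
      by_cases hx : x ∈ PySem.Set.ofList ps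
      · have hadd : PySem.Set.add (PySem.Set.ofList ps) x = PySem.Set.ofList ps := by
          simp [PySem.Set.add, PySem.Set.contains, hx]
        rw [hof, hadd, ih]
        simp only [List.map_append, List.map_cons, List.map_nil, pvSelMin, List.foldl_append, List.foldl_cons, List.foldl_nil]
        by_cases hFx : F x = -1
        · cases List.foldl pvSelStep none (ps.map (fun p => (p, F p))) <;>
            simp [pvSelStep, hFx]
        · have hxps : x ∈ ps := (PySem.Set.mem_ofList ps x).1 hx
          have hmem : (x, F x) ∈ ps.map (fun p => (p, F p)) := List.mem_map_of_mem hxps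
          obtain ⟨b', h1, h2, h3⟩ := pvSelFold_mem (ps.map (fun p => (p, F p))) (x, F x) hmem hFx none (by simp)
          rw [h1]
          simp only [pvSelStep]
          have : ¬ ((x, F x).2 ≠ -1 ∧ (x, F x).2 < b'.2) := by simp at h2 ⊢; omega
          simp [this]
      · have hadd : PySem.Set.add (PySem.Set.ofList ps) x = PySem.Set.ofList ps ++ [x] := by
          have hc : PySem.Set.contains (PySem.Set.ofList ps) x = false := by
            rw [Bool.eq_false_iff]
            intro h
            exact hx (List.contains_iff_mem.1 h)
          simp only [PySem.Set.add, hc, Bool.false_eq_true, if_false]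
        rw [hof, hadd]
        simp only [List.map_append, List.map_cons, List.map_nil, pvSelMin, List.foldl_append, List.foldl_cons, List.foldl_nil]
        rw [show List.foldl pvSelStep none ((PySem.Set.ofList ps).map (fun p => (p, F p))) = pvSelMin ((PySem.Set.ofList ps).map (fun p => (p, F p))) from rfl, ih]
        rfl

def pvPats (f : String) : List String :=
  ["<span class=\"math-container\">$$ " ++ f ++ " $$</span>",
   "<span class=\"math-container\">$$" ++ f ++ "$$</span>",
   "<span class=\"math-container\">$" ++ f ++ "$</span>",
   "<span class=\"math-container\">" ++ f ++ "</span>",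
   "$$" ++ f ++ "$$",
   "$" ++ f ++ "$",
   " " ++ f ++ " "]

def pvPats8 (f : String) : List String :=
  ["<span class=\"math-container\">$$ " ++ f ++ " $$</span>",
   "<span class=\"math-container\">$$" ++ f ++ "$$</span>",
   "<span class=\"math-container\">$" ++ f ++ "$</span>",
   "<span class=\"math-container\">$$" ++ f ++ "$$</span>",
   "<span class=\"math-container\">" ++ f ++ "</span>",
   "$$" ++ f ++ "$$",
   "$" ++ f ++ "$",
   " " ++ f ++ " "]

theorem pvMtp_eq_foldl (f t : String) :
    match_to_pattern f t = (pvPats8 f).foldl (fun d p => d.insert p (PySem.Str.find t p)) PySem.Dict.empty := by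
  simp only [match_to_pattern, pvPats8, List.foldl_cons, List.foldl_nil]

theorem pvDedup_pats8 (f : String) : PySem.List.dedup (pvPats8 f) = PySem.List.dedup (pvPats f) := by
  simp only [PySem.List.dedup_eq_ofList]
  exact pvOfList_dup ["<span class=\"math-container\">$$ " ++ f ++ " $$</span>",
    "<span class=\"math-container\">$$" ++ f ++ "$$</span>",
    "<span class=\"math-container\">$" ++ f ++ "$</span>"] _ _ (by simp)

theorem pvCE (d : PySem.Dict String Int) (hne : d.items ≠ []) :
    check_existence d = (pvSelMin d.items).isSome := by
  unfold check_existence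
  set vals := d.values with hv
  have hvne : vals ≠ [] := by
    cases hit : d.items with
    | nil => exact absurd hit hne
    | cons a l => simp [hv, PySem.Dict.values, hit]
  set s := PySem.Set.ofList vals with hs
  have hmemvals : ∀ kv ∈ d.items, kv.2 ∈ vals := by
    intro kv hkv
    simp only [hv, PySem.Dict.values]
    exact List.mem_map_of_mem hkv
  by_cases h1 : 1 < s.length
  · rw [if_pos h1]
    have hex : ∃ kv ∈ d.items, kv.2 ≠ -1 := by
      by_contra hno
      push Not at hno
      have hall : ∀ v ∈ s, v = -1 := by
        intro v hvmem
        have hvv : v ∈ vals := (PySem.Set.mem_ofList vals v).1 hvmem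
        simp only [hv, PySem.Dict.values] at hvv
        obtain ⟨kv, hkv, rfl⟩ := List.mem_map.1 hvv
        exact hno kv hkv
      have hnd : s.Nodup := PySem.Set.nodup_ofList vals
      have h2 : 2 ≤ s.length := h1
      have hab : s[0] ≠ s[1] := by
        intro hcontra
        have := (List.Nodup.getElem_inj_iff hnd).1 hcontra
        omega
      exact hab ((hall _ (s.getElem_mem _)).trans (hall _ (s.getElem_mem _)).symm)
    obtain ⟨kv, hkv, hkv2⟩ := hex
    obtain ⟨b', hb1, _, _⟩ := pvSelFold_mem d.items kv hkv hkv2 none (by simp)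
    simp [pvSelMin, hb1]
  · rw [if_neg h1]
    have hsne : s ≠ [] := by
      have : vals.head hvne ∈ s := (PySem.Set.mem_ofList vals _).2 (List.head_mem hvne)
      exact List.ne_nil_of_mem this
    have hlen : s.length = 1 := by
      have := List.length_pos_of_ne_nil hsne
      omega
    obtain ⟨v, hv1⟩ := List.length_eq_one_iff.1 hlen
    have hallv : ∀ w ∈ vals, w = v := by
      intro w hw
      have : w ∈ s := (PySem.Set.mem_ofList vals w).2 hw
      rw [hv1] at this
      simpa using this
    have hget : PySem.List.pyGet? s 0 = some v := by
      rw [hv1]; simp [PySem.List.pyGet?, PySem.List.pyIdx?]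
    by_cases hvneg : v = -1
    · rw [if_pos (by rw [hget, hvneg])]
      have : pvSelMin d.items = none := by
        rw [pvSelMin, pvSelFold_none_iff]
        intro kv hkv
        exact hvneg ▸ hallv _ (hmemvals kv hkv)
      simp [this]
    · rw [if_neg (by rw [hget]; simp [hvneg])]
      cases hit : d.items with
      | nil => exact absurd hit hne
      | cons i0 rest =>
          have hi02 : i0.2 = v := hallv _ (hmemvals i0 (by simp [hit]))
          obtain ⟨b', hb1, _, _⟩ := pvSelFold_mem d.items i0 (by simp [hit]) (hi02 ▸ hvneg) none (by simp)
          simp only [pvSelMin]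
          rw [← hit, hb1]
          rfl

theorem pvSelect_eq (f t : String) :
    (PySem.List.sorted (match_to_pattern f t).items (fun kv => kv.2) false).find? (fun kv => kv.2 ≠ -1)
      = pvSelMin ((pvPats f).map (fun p => (p, PySem.Str.find t p))) := by
  have hitems : (match_to_pattern f t).items
      = (PySem.List.dedup (pvPats8 f)).map (fun p => (p, PySem.Str.find t p)) := by
    rw [pvMtp_eq_foldl, pvItems_foldl_insert]
  have hge : ∀ kv ∈ (match_to_pattern f t).items, -1 ≤ kv.2 := by
    intro kv hkv
    rw [hitems] at hkv
    obtain ⟨p, _, rfl⟩ := List.mem_map.1 hkv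
    simpa using PySem.Chars.neg_one_le_find t.toList p.toList
  rw [pvSEL _ hge, hitems, pvDedup_pats8, pvSelMin_dedup]

theorem pvCE_eq (f t : String) :
    check_existence (match_to_pattern f t)
      = (pvSelMin ((pvPats f).map (fun p => (p, PySem.Str.find t p)))).isSome := by
  have hitems : (match_to_pattern f t).items
      = (PySem.List.dedup (pvPats8 f)).map (fun p => (p, PySem.Str.find t p)) := by
    rw [pvMtp_eq_foldl, pvItems_foldl_insert]
  have hne : (match_to_pattern f t).items ≠ [] := by
    rw [hitems]
    have : (" " ++ f ++ " ") ∈ PySem.List.dedup (pvPats8 f) := by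
      rw [PySem.List.dedup_eq_ofList]
      refine (PySem.Set.mem_ofList _ _).2 ?_
      simp [pvPats8]
    exact List.ne_nil_of_mem (List.mem_map_of_mem this)
  rw [pvCE _ hne, hitems, pvDedup_pats8, pvSelMin_dedup]

theorem pvInsertBy_congr {α : Type} (b1 b2 : α → α → Bool) (x : α) (ys : List α)
    (h : ∀ y ∈ ys, b1 x y = b2 x y) : PySem.List.insertBy b1 x ys = PySem.List.insertBy b2 x ys := by
  induction ys with
  | nil => rfl
  | cons y ys ih =>
      have hy : b1 x y = b2 x y := h y (List.mem_cons_self)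
      by_cases hb : b1 x y = true
      · have hb2 : b2 x y = true := hy ▸ hb
        simp [PySem.List.insertBy, hb, hb2]
      · have hb2 : b2 x y = false := by rw [← hy]; exact Bool.not_eq_true _ ▸ (Bool.eq_false_iff.2 hb)
        have hb1 : b1 x y = false := Bool.eq_false_iff.2 hb
        simp [PySem.List.insertBy, hb1, hb2]
        exact ih (fun z hz => h z (List.mem_cons_of_mem _ hz))

theorem pvFoldl_insertBy_congr {α : Type} (b1 b2 : α → α → Bool) :
    ∀ (xs acc : List α), (∀ x ∈ xs, ∀ y, (y ∈ acc ∨ y ∈ xs) → b1 x y = b2 x y) →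
      xs.foldl (fun a x => PySem.List.insertBy b1 x a) acc
        = xs.foldl (fun a x => PySem.List.insertBy b2 x a) acc := by
  intro xs
  induction xs with
  | nil => intro acc _; rfl
  | cons x xs ih =>
      intro acc h
      simp only [List.foldl_cons]
      rw [pvInsertBy_congr b1 b2 x acc
        (fun y hy => h x (List.mem_cons_self) y (Or.inl hy))]
      exact ih _ (fun z hz y hy => by
        rcases hy with hy | hy
        · rcases (PySem.List.mem_insertBy b2 x y acc).1 hy with rfl | hy'
          · exact h z (List.mem_cons_of_mem _ hz) y (Or.inr List.mem_cons_self)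
          · exact h z (List.mem_cons_of_mem _ hz) y (Or.inl hy')
        · exact h z (List.mem_cons_of_mem _ hz) y (Or.inr (List.mem_cons_of_mem _ hy)))

theorem pvSorted_rev_congr {α : Type} (xs : List α) (k1 k2 : α → Int)
    (h : ∀ x ∈ xs, k1 x = k2 x) :
    PySem.List.sorted xs k1 true = PySem.List.sorted xs k2 true := by
  rw [PySem.List.sorted_rev_eq_foldl_insertBy, PySem.List.sorted_rev_eq_foldl_insertBy]
  apply pvFoldl_insertBy_congr
  intro x hx y hy
  rcases hy with hy | hy
  · simp at hy
  · rw [h x hx, h y hy]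

theorem pvIds_eq (lst : List Int) (dic : PySem.Dict Int String) :
    get_sorted_dic_formulas lst dic
      = PySem.List.sorted (PySem.List.dedup lst)
          (fun k => (PySem.Str.len ((dic.get? k).getD "") : Int)) true := by
  simp only [get_sorted_dic_formulas]
  have hkeys : (lst.foldl (fun d fid => d.insert fid ((dic.get? fid).getD "")) PySem.Dict.empty).keys
      = PySem.Set.ofList lst := by
    rw [PySem.Dict.keys_foldl_insert, PySem.Set.ofList_eq_foldl]; rfl
  rw [hkeys, PySem.List.dedup_eq_ofList]
  apply pvSorted_rev_congr
  intro k hk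
  have hkl : k ∈ lst := (PySem.Set.mem_ofList lst k).1 hk
  rw [pvGet_foldl_insert (fun fid => (dic.get? fid).getD "") lst PySem.Dict.empty k]
  simp [hkl]

theorem pvPats_def (f : String) : pvPats f =
    ["<span class=\"math-container\">$$ " ++ f ++ " $$</span>",
     "<span class=\"math-container\">$$" ++ f ++ "$$</span>",
     "<span class=\"math-container\">$" ++ f ++ "$</span>",
     "<span class=\"math-container\">" ++ f ++ "</span>",
     "$$" ++ f ++ "$$",
     "$" ++ f ++ "$",
     " " ++ f ++ " "] := rfl

-- ---- B side: the position-major scan equals the pvSelMin selection ----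

-- index-style characterization of List.find?
theorem pvFind?_idx {α : Type} (P : α → Bool) :
    ∀ (l : List α) (b : α), l.find? P = some b →
      ∃ n : Nat, l[n]? = some b ∧ P b = true ∧ ∀ j < n, ∀ x : α, l[j]? = some x → P x = false := by
  intro l
  induction l with
  | nil => intro b h; cases h
  | cons a l ih =>
      intro b h
      by_cases hPa : P a = true
      · rw [List.find?_cons_of_pos hPa] at h
        injection h with h; subst h
        exact ⟨0, by simp, hPa, fun j hj => by omega⟩
      · rw [List.find?_cons_of_neg (by simpa using hPa)] at h
        obtain ⟨n, h1, h2, h3⟩ := ih b h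
        refine ⟨n + 1, by simpa using h1, h2, fun j hj x hx => ?_⟩
        cases j with
        | zero =>
            simp only [List.getElem?_cons_zero, Option.some.injEq] at hx
            subst hx
            simpa using hPa
        | succ j => exact h3 j (by omega) x (by simpa using hx)

-- index-style characterization of pvSelMin
theorem pvSelMin_idx (l : List (String × Int)) (b : String × Int) (h : pvSelMin l = some b) :
    ∃ n : Nat, l[n]? = some b ∧ b.2 ≠ -1 ∧
      (∀ j < n, ∀ kv : String × Int, l[j]? = some kv → kv.2 = -1 ∨ b.2 < kv.2) ∧
      (∀ kv ∈ l, kv.2 = -1 ∨ b.2 ≤ kv.2) := by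
  obtain ⟨l1, l2, heq, hbne, hl1, hmin⟩ := pvSelMin_some_spec l b h
  refine ⟨l1.length, ?_, hbne, ?_, hmin⟩
  · rw [heq, List.getElem?_append_right (le_refl _)]
    simp
  · intro j hj kv hkv
    apply hl1
    rw [heq, List.getElem?_append_left hj] at hkv
    exact List.mem_of_getElem? hkv

-- what a successful scan means
theorem pvScan_some (pats : List (List Char)) :
    ∀ (s : List Char) (i m : Nat) (p : List Char), scanHit pats s i = some (m, p) →
      i ≤ m ∧ m - i < s.length ∧
      pats.find? (fun q => q.isPrefixOf (s.drop (m - i))) = some p ∧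
      ∀ k < m - i, pats.find? (fun q => q.isPrefixOf (s.drop k)) = none := by
  intro s
  induction s with
  | nil => intro i m p h; cases h
  | cons c rest ih =>
      intro i m p h
      rcases hf : (pats.find? (fun q => q.isPrefixOf (c :: rest))) with _ | p0
      · rw [scanHit, hf] at h
        obtain ⟨h1, h2, h3, h4⟩ := ih (i + 1) m p h
        have him : i + 1 ≤ m := h1
        refine ⟨by omega, by simp; omega, ?_, ?_⟩
        · have hmi : m - i = (m - (i + 1)) + 1 := by omega
          rw [hmi, List.drop_succ_cons]
          exact h3
        · intro k hk
          cases k with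
          | zero => simpa using hf
          | succ k =>
              rw [List.drop_succ_cons]
              exact h4 k (by omega)
      · rw [scanHit, hf] at h
        simp only [Option.some.injEq, Prod.mk.injEq] at h
        obtain ⟨rfl, rfl⟩ := h
        refine ⟨le_refl _, by simp, by simpa using hf, by omega⟩

-- what a failed scan means
theorem pvScan_none (pats : List (List Char)) :
    ∀ (s : List Char) (i : Nat), scanHit pats s i = none →
      ∀ k < s.length, pats.find? (fun q => q.isPrefixOf (s.drop k)) = none := by
  intro s
  induction s with
  | nil => intro i h k hk; simp at hk
  | cons c rest ih =>
      intro i h k hk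
      rcases hf : (pats.find? (fun q => q.isPrefixOf (c :: rest))) with _ | p0
      · rw [scanHit, hf] at h
        cases k with
        | zero => simpa using hf
        | succ k =>
            rw [List.drop_succ_cons]
            exact ih (i + 1) h k (by simpa using hk)
      · rw [scanHit, hf] at h
        cases h

-- a prefix occurrence at k bounds find
theorem pvFind_le_of_prefix (s sub : List Char) (k : Nat) (h : sub <+: s.drop k) :
    PySem.Chars.find s sub ≠ -1 ∧ PySem.Chars.find s sub ≤ (k : Int) := by
  have hIn : PySem.Chars.isIn sub s = true :=
    (PySem.Chars.exists_prefix_drop_iff_isIn (s := s) (sub := sub)).1 ⟨k, h⟩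
  have hinf := (PySem.Chars.isIn_iff_infix (s := s) (sub := sub)).1 hIn
  have hne : PySem.Chars.find s sub ≠ -1 := (PySem.Chars.find_ne_neg_one_iff s sub).2 hinf
  have hm1 := PySem.Chars.neg_one_le_find s sub
  have h0 : 0 ≤ PySem.Chars.find s sub := by omega
  refine ⟨hne, ?_⟩
  by_contra hgt
  have hgt2 : (k : Int) < PySem.Chars.find s sub := lt_of_not_ge hgt
  have hk : k < (PySem.Chars.find s sub).toNat := by omega
  exact (PySem.Chars.find_spec (s := s) (sub := sub) h0).2 k hk h

-- the main bridge: position-major scan = first-minimal find position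
theorem pvScan_eq_selmin (s : List Char) (pats : List String) (hne : ∀ p ∈ pats, p.toList ≠ []) :
    scanHit (pats.map String.toList) s 0
      = (pvSelMin (pats.map (fun p => (p, PySem.Chars.find s p.toList)))).map
          (fun kv => (kv.2.toNat, kv.1.toList)) := by
  set F : String → Int := fun p => PySem.Chars.find s p.toList with hF
  set L := pats.map (fun p => (p, F p)) with hL
  rcases hscan : scanHit (pats.map String.toList) s 0 with _ | ⟨m, pl⟩
  · rcases hsel : pvSelMin L with _ | b
    · rfl
    · exfalso
      obtain ⟨n, hn, hbne, hl1, hmin⟩ := pvSelMin_idx L b hsel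
      rw [hL, List.getElem?_map] at hn
      rcases hp : pats[n]? with _ | p
      · rw [hp] at hn; cases hn
      · rw [hp] at hn
        simp only [Option.map_some, Option.some.injEq] at hn
        subst hn
        have h0 : 0 ≤ F p := by
          have := PySem.Chars.neg_one_le_find s p.toList
          simp only [hF] at *
          omega
        obtain ⟨hpref, _⟩ := PySem.Chars.find_spec (s := s) (sub := p.toList) h0
        have hple := PySem.Chars.find_le_length s p.toList
        have hpne : p.toList ≠ [] := hne p (List.mem_of_getElem? hp)
        by_cases hlt : (F p).toNat < s.length
        · have hnone := pvScan_none _ s 0 hscan _ hlt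
          rw [List.find?_eq_none] at hnone
          have hmem : p.toList ∈ pats.map String.toList :=
            List.mem_map_of_mem (List.mem_of_getElem? hp)
          exact hnone _ hmem (List.isPrefixOf_iff_prefix.2 hpref)
        · have hlen : (F p).toNat = s.length := by simp only [hF] at *; omega
          rw [hlen, List.drop_length] at hpref
          exact hpne (List.prefix_nil.1 hpref)
  · obtain ⟨_, hmlt, hfind, hnone⟩ := pvScan_some _ s 0 m pl hscan
    simp only [Nat.sub_zero] at hmlt hfind hnone
    obtain ⟨n2, hn2, hP2, hbefore2⟩ := pvFind?_idx _ _ _ hfind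
    rw [List.getElem?_map] at hn2
    rcases hq : pats[n2]? with _ | q
    · rw [hq] at hn2; cases hn2
    · rw [hq] at hn2
      simp only [Option.map_some, Option.some.injEq] at hn2
      subst hn2
      rw [List.isPrefixOf_iff_prefix] at hP2
      obtain ⟨hqne, hqle⟩ := pvFind_le_of_prefix s q.toList m hP2
      have hqmem : (q, F q) ∈ L := by
        rw [hL]; exact List.mem_map_of_mem (List.mem_of_getElem? hq)
      rcases hsel : pvSelMin L with _ | b
      · exfalso
        exact hqne ((pvSelFold_none_iff L).1 hsel (q, F q) hqmem)
      · obtain ⟨n1, hn1, hbne, hl1, hmin⟩ := pvSelMin_idx L b hsel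
        rw [hL, List.getElem?_map] at hn1
        rcases hp : pats[n1]? with _ | p
        · rw [hp] at hn1; cases hn1
        · rw [hp] at hn1
          simp only [Option.map_some, Option.some.injEq] at hn1
          subst hn1
          have h0 : 0 ≤ F p := by
            have := PySem.Chars.neg_one_le_find s p.toList
            simp only [hF] at *
            omega
          obtain ⟨hppref, _⟩ := PySem.Chars.find_spec (s := s) (sub := p.toList) h0
          have hvle : F p ≤ (m : Int) := by
            rcases hmin (q, F q) hqmem with h' | h'
            · exact absurd h' hqne
            · exact le_trans h' hqle
          have hvge : ¬ (F p).toNat < m := by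
            intro hlt
            have hn := hnone _ hlt
            rw [List.find?_eq_none] at hn
            exact hn p.toList (List.mem_map_of_mem (List.mem_of_getElem? hp))
              (List.isPrefixOf_iff_prefix.2 hppref)
          have hveq : F p = (m : Int) := by omega
          rcases lt_trichotomy n1 n2 with hlt | heq | hgt
          · exfalso
            have hPfalse := hbefore2 n1 hlt p.toList (by rw [List.getElem?_map, hp]; rfl)
            have hveq2 : PySem.Chars.find s p.toList = (m : Int) := hveq
            rw [hveq2] at hppref
            simp only [Int.toNat_natCast] at hppref
            rw [Bool.eq_false_iff] at hPfalse
            exact hPfalse (by rw [List.isPrefixOf_iff_prefix]; exact hppref)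
          · subst heq
            rw [hp] at hq
            injection hq with hq
            subst hq
            simp [hveq]
          · exfalso
            rcases hl1 n2 hgt (q, F q) (by rw [List.getElem?_map, hq]; rfl) with h' | h'
            · exact hqne h'
            · simp only at h'
              have hFq : F q = PySem.Chars.find s q.toList := rfl
              omega

theorem pvPats_nonempty (f : String) : ∀ p ∈ pvPats f, p.toList ≠ [] := by
  intro p hp
  simp only [pvPats, List.mem_cons, List.not_mem_nil, or_false] at hp
  rcases hp with rfl | rfl | rfl | rfl | rfl | rfl | rfl <;>
    · simp only [String.toList_append]
      exact List.append_ne_nil_of_right_ne_nil _ (by decide)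

theorem pvLoop_eq (dic : PySem.Dict Int String) (st : String × List Int × List Int) (fid : Int) :
    set_formulas_loop dic st fid = set_formulas_alt_loop dic st fid := by
  unfold set_formulas_loop set_formulas_alt_loop
  dsimp only
  rw [pvCE_eq, pvSelect_eq, ← pvPats_def ((dic.get? fid).getD ""),
    pvScan_eq_selmin st.1.toList (pvPats ((dic.get? fid).getD "")) (pvPats_nonempty _)]
  simp only [PySem.Str.find_eq]
  set f := (dic.get? fid).getD "" with hf
  set M := (pvPats f).map (fun p => (p, PySem.Chars.find st.1.toList p.toList)) with hM
  rcases hsel : pvSelMin M with _ | b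
  · simp
  · simp only [Option.isSome_some, if_true, Option.map_some]
    obtain ⟨l1, l2, heq, hbne, _, _⟩ := pvSelMin_some_spec _ b hsel
    have hbmem : b ∈ M := by rw [heq]; simp
    obtain ⟨p, hpmem, hpe⟩ := List.mem_map.1 hbmem
    rcases b with ⟨bp, bv⟩
    simp only [Prod.mk.injEq] at hpe
    obtain ⟨rfl, rfl⟩ := hpe
    simp only [pyReplace1, PySem.Str.find_eq]
    rw [if_neg (by simpa using hbne)]

-- ===== VERDICT (by name: the statement is the Claim_ definition above) =====
theorem set_formulas_spec : Claim_equal_set_formulas := by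
  intro text lst dic_latex rdic _hdom _hpre
  unfold Spec_set_formulas set_formulas set_formulas_alt
  rw [pvIds_eq]
  exact PySem.List.foldl_congr_mem _ _ _ _ (fun st fid _ => pvLoop_eq _ st fid)
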